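-- pv_equiv track=rewrite | github.com/skenderidis/bigip-audit | analysis_ltm.py | build_interface_summary
-- ===== SOURCE A (Python) =====
-- def build_interface_summary(per_if: dict):
--     summary = {
--         "interfaces_count": len(per_if),
--         "packets_in": 0,
--         "packets_out": 0,
--         "packets_total": 0,
--         "errors_in": 0,
--         "errors_out": 0,
--         "errors_total": 0,
--         "drops_in": 0,
--         "drops_out": 0,
--         "drops_total": 0,
--         "collisions": 0,
--     }
--
--     for stats in per_if.values():
-- #        summary["packets_in"]    += stats.get("packets_in", 0)
-- #        summary["packets_out"]   += stats.get("packets_out", 0)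
-- #        summary["packets_total"] += stats.get("packets_total", 0)
--         summary["errors_in"]    += stats.get("errors_in", 0)
--         summary["errors_out"]   += stats.get("errors_out", 0)
--         summary["errors_total"] += stats.get("errors_total", 0)
--         summary["drops_in"]     += stats.get("drops_in", 0)
--         summary["drops_out"]    += stats.get("drops_out", 0)
--         summary["drops_total"]  += stats.get("drops_total", 0)
--         summary["collisions"]   += stats.get("collisions", 0)
--
--     return summary
-- ===== SOURCE B (Python) =====
-- def _total(per_if, key):
--     return sum(stats.get(key, 0) for stats in per_if.values())
--
--
-- def build_interface_summary(per_if: dict):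
--     return {
--         "interfaces_count": len(per_if),
--         "packets_in": 0,
--         "packets_out": 0,
--         "packets_total": 0,
--         "errors_in": _total(per_if, "errors_in"),
--         "errors_out": _total(per_if, "errors_out"),
--         "errors_total": _total(per_if, "errors_total"),
--         "drops_in": _total(per_if, "drops_in"),
--         "drops_out": _total(per_if, "drops_out"),
--         "drops_total": _total(per_if, "drops_total"),
--         "collisions": _total(per_if, "collisions"),
--     }
-- ===== Notes on version B (the rewrite author's own statement) =====
-- stated objective: simpler
-- what changed: Replaces the mutating interface-major accumulation loop with a single dict literal whose counters are independent field-major sum() reductions over per_if.values().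
import Mathlib
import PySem

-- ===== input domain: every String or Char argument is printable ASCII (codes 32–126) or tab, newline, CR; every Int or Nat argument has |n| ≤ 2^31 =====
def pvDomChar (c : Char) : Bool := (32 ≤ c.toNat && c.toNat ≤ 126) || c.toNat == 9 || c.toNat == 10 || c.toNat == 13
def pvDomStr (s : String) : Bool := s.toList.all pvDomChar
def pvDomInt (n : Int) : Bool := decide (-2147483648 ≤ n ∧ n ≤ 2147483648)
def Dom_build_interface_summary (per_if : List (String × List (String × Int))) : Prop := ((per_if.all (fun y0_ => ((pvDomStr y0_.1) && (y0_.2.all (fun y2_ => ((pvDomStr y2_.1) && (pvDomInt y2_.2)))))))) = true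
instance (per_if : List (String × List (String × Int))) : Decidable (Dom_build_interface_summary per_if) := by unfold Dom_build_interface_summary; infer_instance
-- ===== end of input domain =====

-- B replaces A's mutating accumulation loop by independent per-field sum reductions (objective: simpler).

-- ===== PORT A =====
-- Transliteration of A: build the summary dict literal, then one loop over
-- per_if.values() that += each counter; return the dict (as its items list).
def build_interface_summary (per_if : List (String × List (String × Int))) : List (String × Int) :=
  let summary : PySem.Dict String Int := PySem.Dict.mk
    [("interfaces_count", (per_if.length : Int)),
     ("packets_in", 0), ("packets_out", 0), ("packets_total", 0),
     ("errors_in", 0), ("errors_out", 0), ("errors_total", 0),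
     ("drops_in", 0), ("drops_out", 0), ("drops_total", 0),
     ("collisions", 0)]
  let summary := per_if.foldl (fun s kv =>
    let stats : PySem.Dict String Int := PySem.Dict.mk kv.2
    let s := s.modify "errors_in" 0 (· + stats.getD "errors_in" 0)
    let s := s.modify "errors_out" 0 (· + stats.getD "errors_out" 0)
    let s := s.modify "errors_total" 0 (· + stats.getD "errors_total" 0)
    let s := s.modify "drops_in" 0 (· + stats.getD "drops_in" 0)
    let s := s.modify "drops_out" 0 (· + stats.getD "drops_out" 0)
    let s := s.modify "drops_total" 0 (· + stats.getD "drops_total" 0)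
    let s := s.modify "collisions" 0 (· + stats.getD "collisions" 0)
    s) summary
  summary.items

-- ===== PORT B =====
-- sum(stats.get(key, 0) for stats in per_if.values())
def bi_total (per_if : List (String × List (String × Int))) (key : String) : Int :=
  (per_if.map (fun kv => (PySem.Dict.mk kv.2).getD key 0)).foldl (· + ·) 0

def build_interface_summary_alt (per_if : List (String × List (String × Int))) : List (String × Int) :=
  [("interfaces_count", (per_if.length : Int)),
   ("packets_in", 0), ("packets_out", 0), ("packets_total", 0),
   ("errors_in", bi_total per_if "errors_in"),
   ("errors_out", bi_total per_if "errors_out"),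
   ("errors_total", bi_total per_if "errors_total"),
   ("drops_in", bi_total per_if "drops_in"),
   ("drops_out", bi_total per_if "drops_out"),
   ("drops_total", bi_total per_if "drops_total"),
   ("collisions", bi_total per_if "collisions")]

-- ===== PRECONDITION & SPEC =====
def Spec_build_interface_summary (per_if : List (String × List (String × Int))) (out : List (String × Int)) : Prop := out = build_interface_summary_alt per_if
instance (per_if : List (String × List (String × Int))) (out : List (String × Int)) : Decidable (Spec_build_interface_summary per_if out) := by unfold Spec_build_interface_summary; infer_instance

-- ===== CLAIM (what is proved, stated in full; the proofs are below) =====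
def Claim_equal_build_interface_summary : Prop := ∀ (per_if : List (String × List (String × Int))), Dom_build_interface_summary per_if → Spec_build_interface_summary per_if (build_interface_summary per_if)

-- ===== LEMMAS AND PROOFS =====

-- the summary dict with symbolic counter values
def biD (i e1 e2 e3 d1 d2 d3 c : Int) : PySem.Dict String Int := PySem.Dict.mk
  [("interfaces_count", i),
   ("packets_in", 0), ("packets_out", 0), ("packets_total", 0),
   ("errors_in", e1), ("errors_out", e2), ("errors_total", e3),
   ("drops_in", d1), ("drops_out", d2), ("drops_total", d3),
   ("collisions", c)]

def biG (kv : String × List (String × Int)) (key : String) : Int :=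
  (PySem.Dict.mk kv.2).getD key 0

def biStep (s : PySem.Dict String Int) (kv : String × List (String × Int)) : PySem.Dict String Int :=
  let stats : PySem.Dict String Int := PySem.Dict.mk kv.2
  let s := s.modify "errors_in" 0 (· + stats.getD "errors_in" 0)
  let s := s.modify "errors_out" 0 (· + stats.getD "errors_out" 0)
  let s := s.modify "errors_total" 0 (· + stats.getD "errors_total" 0)
  let s := s.modify "drops_in" 0 (· + stats.getD "drops_in" 0)
  let s := s.modify "drops_out" 0 (· + stats.getD "drops_out" 0)
  let s := s.modify "drops_total" 0 (· + stats.getD "drops_total" 0)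
  let s := s.modify "collisions" 0 (· + stats.getD "collisions" 0)
  s

lemma biStep_biD (i e1 e2 e3 d1 d2 d3 c : Int) (kv : String × List (String × Int)) :
    biStep (biD i e1 e2 e3 d1 d2 d3 c) kv =
      biD i (e1 + biG kv "errors_in") (e2 + biG kv "errors_out") (e3 + biG kv "errors_total")
            (d1 + biG kv "drops_in") (d2 + biG kv "drops_out") (d3 + biG kv "drops_total")
            (c + biG kv "collisions") := by
  rfl

lemma biShift (l : List Int) : ∀ (a : Int), l.foldl (· + ·) a = a + l.foldl (· + ·) 0 := by
  induction l with
  | nil => intro a; simp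
  | cons x xs ih =>
    intro a
    simp only [List.foldl_cons]
    rw [ih (a + x), ih (0 + x)]
    ring

lemma biFold (l : List (String × List (String × Int))) :
    ∀ (i e1 e2 e3 d1 d2 d3 c : Int),
      l.foldl biStep (biD i e1 e2 e3 d1 d2 d3 c) =
        biD i (e1 + (l.map (fun kv => biG kv "errors_in")).foldl (· + ·) 0)
              (e2 + (l.map (fun kv => biG kv "errors_out")).foldl (· + ·) 0)
              (e3 + (l.map (fun kv => biG kv "errors_total")).foldl (· + ·) 0)
              (d1 + (l.map (fun kv => biG kv "drops_in")).foldl (· + ·) 0)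
              (d2 + (l.map (fun kv => biG kv "drops_out")).foldl (· + ·) 0)
              (d3 + (l.map (fun kv => biG kv "drops_total")).foldl (· + ·) 0)
              (c + (l.map (fun kv => biG kv "collisions")).foldl (· + ·) 0) := by
  induction l with
  | nil => intro i e1 e2 e3 d1 d2 d3 c; simp
  | cons hd tl ih =>
    intro i e1 e2 e3 d1 d2 d3 c
    simp only [List.foldl_cons, List.map_cons, biStep_biD, ih, zero_add]
    rw [biShift _ (biG hd "errors_in"), biShift _ (biG hd "errors_out"), biShift _ (biG hd "errors_total"), biShift _ (biG hd "drops_in"), biShift _ (biG hd "drops_out"), biShift _ (biG hd "drops_total"), biShift _ (biG hd "collisions")]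
    simp [add_assoc]

-- ===== VERDICT (by name: the statement is the Claim_ definition above) =====
theorem build_interface_summary_spec : Claim_equal_build_interface_summary := by
  intro per_if _
  show build_interface_summary per_if = build_interface_summary_alt per_if
  have h : build_interface_summary per_if =
      (per_if.foldl biStep (biD (per_if.length : Int) 0 0 0 0 0 0 0)).items := rfl
  rw [h, biFold]
  simp [biD, build_interface_summary_alt, bi_total, biG]
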